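-- pv_equiv track=rewrite | github.com/KeckObservatory/RemoteObserving | keck_vnc_launcher.py | determine_instrument
-- ===== SOURCE A (Python) =====
-- def determine_instrument(account):
--     '''Given an account name, determine the instrument and telescope.
--     '''
--     accounts = {'mosfire':  [f'mosfire{i}' for i in range(1,10)],
--                 'hires':    [f'hires{i}'   for i in range(1,10)],
--                 'osiris':   [f'osiris{i}'  for i in range(1,10)],
--                 'lris':     [f'lris{i}'    for i in range(1,10)],
--                 'nires':    [f'nires{i}'   for i in range(1,10)],
--                 'deimos':   [f'deimos{i}'  for i in range(1,10)],
--                 'esi':      [f'esi{i}'     for i in range(1,10)],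
--                 'nirc2':    [f'nirc{i}'    for i in range(1,10)],
--                 'nirspec':  [f'nspec{i}'   for i in range(1,10)],
--                 'kcwi':     [f'kcwi{i}'    for i in range(1,10)],
--                 'kpf':      [f'kpf{i}'     for i in range(1,10)],
--                 'k1ao':     ['k1obsao'],
--                 'k2ao':     ['k2obsao'],
--                 'k1inst':   ['k1insttech'],
--                 'k2inst':   ['k2insttech'],
--                 'k1pcs':   ['k1pcs'],
--                 'k2pcs':   ['k2pcs'],
--                }
--     accounts['mosfire'].append('moseng')
--     accounts['hires'].append('hireseng')
--     accounts['osiris'].append('osrseng')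
--     accounts['lris'].append('lriseng')
--     accounts['nires'].append('nireseng')
--     accounts['deimos'].append('dmoseng')
--     accounts['esi'].append('esieng')
--     accounts['nirc2'].append('nirc2eng')
--     accounts['nirspec'].append('nspeceng')
--     accounts['kcwi'].append('kcwieng')
--     accounts['kpf'].append('kpfeng')
--
--     telescope = {'mosfire': 1,
--                  'hires':   1,
--                  'osiris':  1,
--                  'lris':    1,
--                  'kpf':     1,
--                  'k1ao':    1,
--                  'k1inst':  1,
--                  'k1pcs':   1,
--                  'nires':   2,
--                  'deimos':  2,
--                  'esi':     2,
--                  'nirc2':   2,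
--                  'nirspec': 2,
--                  'kcwi':    2,
--                  'k2ao':    2,
--                  'k2inst':  2,
--                  'k2pcs':   2,
--                 }
--
--     for instrument in accounts.keys():
--         if account.lower() in accounts[instrument]:
--             return instrument, telescope[instrument]
--
--     return None, None
-- ===== SOURCE B (Python) =====
-- # B: build one flat account->(instrument, telescope) table once, then a single dict lookup.
-- _SPECS = [('mosfire', 'mosfire', 'moseng',   1),
--           ('hires',   'hires',   'hireseng', 1),
--           ('osiris',  'osiris',  'osrseng',  1),
--           ('lris',    'lris',    'lriseng',  1),
--           ('nires',   'nires',   'nireseng', 2),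
--           ('deimos',  'deimos',  'dmoseng',  2),
--           ('esi',     'esi',     'esieng',   2),
--           ('nirc2',   'nirc',    'nirc2eng', 2),
--           ('nirspec', 'nspec',   'nspeceng', 2),
--           ('kcwi',    'kcwi',    'kcwieng',  2),
--           ('kpf',     'kpf',     'kpfeng',   1)]
--
-- _SINGLES = [('k1ao',   'k1obsao',    1),
--             ('k2ao',   'k2obsao',    2),
--             ('k1inst', 'k1insttech', 1),
--             ('k2inst', 'k2insttech', 2),
--             ('k1pcs',  'k1pcs',      1),
--             ('k2pcs',  'k2pcs',      2)]
--
-- _TABLE = {}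
-- for _inst, _prefix, _eng, _tel in _SPECS:
--     for _i in range(1, 10):
--         _TABLE[f'{_prefix}{_i}'] = (_inst, _tel)
--     _TABLE[_eng] = (_inst, _tel)
-- for _inst, _name, _tel in _SINGLES:
--     _TABLE[_name] = (_inst, _tel)
--
--
-- def determine_instrument(account):
--     '''Given an account name, determine the instrument and telescope.
--     '''
--     return _TABLE.get(account.lower(), (None, None))
-- ===== Notes on version B (the rewrite author's own statement) =====
-- stated objective: simpler
-- what changed: A rebuilds the per-instrument account lists and scans 17 of them with a membership test each call; B builds one flat account->(instrument, telescope) dictionary once at module load and answers with a single dict.get with default (None, None).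
import Mathlib
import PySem

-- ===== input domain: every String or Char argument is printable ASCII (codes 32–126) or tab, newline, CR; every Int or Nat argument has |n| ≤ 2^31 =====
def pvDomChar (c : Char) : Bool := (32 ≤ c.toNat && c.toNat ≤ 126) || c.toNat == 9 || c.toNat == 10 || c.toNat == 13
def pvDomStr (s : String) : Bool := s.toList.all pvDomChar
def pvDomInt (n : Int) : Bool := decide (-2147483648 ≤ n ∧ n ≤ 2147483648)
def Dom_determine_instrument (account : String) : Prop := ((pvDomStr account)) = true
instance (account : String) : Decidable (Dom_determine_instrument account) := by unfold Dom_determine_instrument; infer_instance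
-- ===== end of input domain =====

-- B replaces A's per-instrument scan (a loop over 17 account lists with a membership
-- test in each) by one flat account -> (instrument, telescope) table built once and a
-- single dict lookup with default (None, None).  Both programs are total.

-- ===== PORT A =====
-- accounts = {...} dict literal with list comprehensions [f'{prefix}{i}' for i in range(1,10)]
def accountsA : PySem.Dict String (List String) :=
  let d : PySem.Dict String (List String) := PySem.Dict.ofList
    [("mosfire", (PySem.List.pyRange 1 10 1).map (fun i => "mosfire" ++ PySem.Int.toStr i)),
     ("hires", (PySem.List.pyRange 1 10 1).map (fun i => "hires" ++ PySem.Int.toStr i)),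
     ("osiris", (PySem.List.pyRange 1 10 1).map (fun i => "osiris" ++ PySem.Int.toStr i)),
     ("lris", (PySem.List.pyRange 1 10 1).map (fun i => "lris" ++ PySem.Int.toStr i)),
     ("nires", (PySem.List.pyRange 1 10 1).map (fun i => "nires" ++ PySem.Int.toStr i)),
     ("deimos", (PySem.List.pyRange 1 10 1).map (fun i => "deimos" ++ PySem.Int.toStr i)),
     ("esi", (PySem.List.pyRange 1 10 1).map (fun i => "esi" ++ PySem.Int.toStr i)),
     ("nirc2", (PySem.List.pyRange 1 10 1).map (fun i => "nirc" ++ PySem.Int.toStr i)),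
     ("nirspec", (PySem.List.pyRange 1 10 1).map (fun i => "nspec" ++ PySem.Int.toStr i)),
     ("kcwi", (PySem.List.pyRange 1 10 1).map (fun i => "kcwi" ++ PySem.Int.toStr i)),
     ("kpf", (PySem.List.pyRange 1 10 1).map (fun i => "kpf" ++ PySem.Int.toStr i)),
     ("k1ao", ["k1obsao"]),
     ("k2ao", ["k2obsao"]),
     ("k1inst", ["k1insttech"]),
     ("k2inst", ["k2insttech"]),
     ("k1pcs", ["k1pcs"]),
     ("k2pcs", ["k2pcs"])]
  -- accounts['x'].append(y): the key is always present, so modify with default [] is exact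
  let d := d.modify "mosfire" [] (fun l => l ++ ["moseng"])
  let d := d.modify "hires" [] (fun l => l ++ ["hireseng"])
  let d := d.modify "osiris" [] (fun l => l ++ ["osrseng"])
  let d := d.modify "lris" [] (fun l => l ++ ["lriseng"])
  let d := d.modify "nires" [] (fun l => l ++ ["nireseng"])
  let d := d.modify "deimos" [] (fun l => l ++ ["dmoseng"])
  let d := d.modify "esi" [] (fun l => l ++ ["esieng"])
  let d := d.modify "nirc2" [] (fun l => l ++ ["nirc2eng"])
  let d := d.modify "nirspec" [] (fun l => l ++ ["nspeceng"])
  let d := d.modify "kcwi" [] (fun l => l ++ ["kcwieng"])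
  let d := d.modify "kpf" [] (fun l => l ++ ["kpfeng"])
  d

def telescopeA : PySem.Dict String Int :=
  PySem.Dict.ofList [("mosfire", 1), ("hires", 1), ("osiris", 1), ("lris", 1), ("kpf", 1), ("k1ao", 1), ("k1inst", 1), ("k1pcs", 1), ("nires", 2), ("deimos", 2), ("esi", 2), ("nirc2", 2), ("nirspec", 2), ("kcwi", 2), ("k2ao", 2), ("k2inst", 2), ("k2pcs", 2)]

-- for instrument in accounts.keys(): if account.lower() in accounts[instrument]: return instrument, telescope[instrument]
-- (accounts[instrument] / telescope[instrument]: both keys are always present, so getD is exact)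
def loopA : List String → String → Option String × Option Int
  | [], _ => (none, none)
  | inst :: rest, low =>
    if (accountsA.getD inst []).contains low then
      (some inst, some (telescopeA.getD inst 0))
    else loopA rest low

def determine_instrument (account : String) : Option String × Option Int :=
  loopA accountsA.keys (PySem.Str.lower account)

-- ===== PORT B =====
def specsB : List (String × String × String × Int) :=
  [("mosfire", "mosfire", "moseng", 1),
   ("hires", "hires", "hireseng", 1),
   ("osiris", "osiris", "osrseng", 1),
   ("lris", "lris", "lriseng", 1),
   ("nires", "nires", "nireseng", 2),
   ("deimos", "deimos", "dmoseng", 2),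
   ("esi", "esi", "esieng", 2),
   ("nirc2", "nirc", "nirc2eng", 2),
   ("nirspec", "nspec", "nspeceng", 2),
   ("kcwi", "kcwi", "kcwieng", 2),
   ("kpf", "kpf", "kpfeng", 1)]

def singlesB : List (String × String × Int) :=
  [("k1ao", "k1obsao", 1),
   ("k2ao", "k2obsao", 2),
   ("k1inst", "k1insttech", 1),
   ("k2inst", "k2insttech", 2),
   ("k1pcs", "k1pcs", 1),
   ("k2pcs", "k2pcs", 2)]

-- _TABLE built once: per spec the nine numbered accounts f'{prefix}{i}' and the eng
-- account, then the single-account entries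
def tableB : PySem.Dict String (Option String × Option Int) :=
  let d := specsB.foldl (fun d s =>
    let d := (PySem.List.pyRange 1 10 1).foldl
      (fun d i => d.insert (s.2.1 ++ PySem.Int.toStr i) (some s.1, some s.2.2.2)) d
    d.insert s.2.2.1 (some s.1, some s.2.2.2)) PySem.Dict.empty
  singlesB.foldl (fun d s => d.insert s.2.1 (some s.1, some s.2.2)) d

-- return _TABLE.get(account.lower(), (None, None))
def determine_instrument_alt (account : String) : Option String × Option Int :=
  tableB.getD (PySem.Str.lower account) (none, none)

-- ===== PRECONDITION & SPEC =====
def Spec_determine_instrument (account : String) (out : Option String × Option Int) : Prop := out = determine_instrument_alt account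
instance (account : String) (out : Option String × Option Int) : Decidable (Spec_determine_instrument account out) := by unfold Spec_determine_instrument; infer_instance

-- ===== CLAIM (what is proved, stated in full; the proofs are below) =====
def Claim_equal_determine_instrument : Prop := ∀ (account : String), Dom_determine_instrument account → Spec_determine_instrument account (determine_instrument account)

-- ===== LEMMAS AND PROOFS =====

-- A's data flattened: per instrument, its result value and its account list, in A's key order
def pvGroups : List ((Option String × Option Int) × List String) :=
  [((some "mosfire", some (1 : Int)), ["mosfire1", "mosfire2", "mosfire3", "mosfire4", "mosfire5", "mosfire6", "mosfire7", "mosfire8", "mosfire9", "moseng"]),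
   ((some "hires", some (1 : Int)), ["hires1", "hires2", "hires3", "hires4", "hires5", "hires6", "hires7", "hires8", "hires9", "hireseng"]),
   ((some "osiris", some (1 : Int)), ["osiris1", "osiris2", "osiris3", "osiris4", "osiris5", "osiris6", "osiris7", "osiris8", "osiris9", "osrseng"]),
   ((some "lris", some (1 : Int)), ["lris1", "lris2", "lris3", "lris4", "lris5", "lris6", "lris7", "lris8", "lris9", "lriseng"]),
   ((some "nires", some (2 : Int)), ["nires1", "nires2", "nires3", "nires4", "nires5", "nires6", "nires7", "nires8", "nires9", "nireseng"]),
   ((some "deimos", some (2 : Int)), ["deimos1", "deimos2", "deimos3", "deimos4", "deimos5", "deimos6", "deimos7", "deimos8", "deimos9", "dmoseng"]),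
   ((some "esi", some (2 : Int)), ["esi1", "esi2", "esi3", "esi4", "esi5", "esi6", "esi7", "esi8", "esi9", "esieng"]),
   ((some "nirc2", some (2 : Int)), ["nirc1", "nirc2", "nirc3", "nirc4", "nirc5", "nirc6", "nirc7", "nirc8", "nirc9", "nirc2eng"]),
   ((some "nirspec", some (2 : Int)), ["nspec1", "nspec2", "nspec3", "nspec4", "nspec5", "nspec6", "nspec7", "nspec8", "nspec9", "nspeceng"]),
   ((some "kcwi", some (2 : Int)), ["kcwi1", "kcwi2", "kcwi3", "kcwi4", "kcwi5", "kcwi6", "kcwi7", "kcwi8", "kcwi9", "kcwieng"]),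
   ((some "kpf", some (1 : Int)), ["kpf1", "kpf2", "kpf3", "kpf4", "kpf5", "kpf6", "kpf7", "kpf8", "kpf9", "kpfeng"]),
   ((some "k1ao", some (1 : Int)), ["k1obsao"]),
   ((some "k2ao", some (2 : Int)), ["k2obsao"]),
   ((some "k1inst", some (1 : Int)), ["k1insttech"]),
   ((some "k2inst", some (2 : Int)), ["k2insttech"]),
   ((some "k1pcs", some (1 : Int)), ["k1pcs"]),
   ((some "k2pcs", some (2 : Int)), ["k2pcs"])]

-- first pair whose key equals s, else (none, none) — the shape of a dict lookup
def pvLookF : List (String × (Option String × Option Int)) → String → Option String × Option Int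
  | [], _ => (none, none)
  | (k, v) :: rest, s => if k == s then v else pvLookF rest s

-- first group whose list contains s, else (none, none) — the shape of A's loop
def pvScanG : List ((Option String × Option Int) × List String) → String → Option String × Option Int
  | [], _ => (none, none)
  | (v, ks) :: rest, s => if ks.contains s then v else pvScanG rest s

theorem pvScanG_flatten (gs : List ((Option String × Option Int) × List String)) (s : String) :
    pvScanG gs s = pvLookF (gs.flatMap (fun g => g.2.map (fun k => (k, g.1)))) s := by
  induction gs with
  | nil => rfl
  | cons g rest ih =>
    obtain ⟨v, ks⟩ := g
    induction ks with
    | nil => simpa [pvScanG, pvLookF] using ih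
    | cons k ks ihk =>
      by_cases h : s = k
      · simp [pvScanG, pvLookF, h]
      · have h1 : (s == k) = false := by simp [h]
        have h2 : (k == s) = false := by simp [Ne.symm h]
        calc pvScanG ((v, k :: ks) :: rest) s
            = pvScanG ((v, ks) :: rest) s := by
              simp [pvScanG, h]
          _ = pvLookF (((v, ks) :: rest).flatMap (fun g => g.2.map (fun k => (k, g.1)))) s := ihk
          _ = pvLookF (((v, k :: ks) :: rest).flatMap (fun g => g.2.map (fun k => (k, g.1)))) s := by
              simp [pvLookF, h2]

theorem pvLookF_eq_getD (ps : List (String × (Option String × Option Int))) (s : String) :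
    (PySem.Dict.mk ps).getD s (none, none) = pvLookF ps s := by
  induction ps with
  | nil => rfl
  | cons p rest ih =>
    obtain ⟨k, v⟩ := p
    rw [PySem.Dict.getD_eq_get?_getD, PySem.Dict.get?_mk_cons]
    rw [PySem.Dict.getD_eq_get?_getD] at ih
    by_cases h : (k == s) = true
    · simp [pvLookF, h]
    · simp only [pvLookF, h, if_neg, Bool.not_eq_true] at *
      simpa using ih

theorem pvA_eq_scan (s : String) : loopA accountsA.keys s = pvScanG pvGroups s := by
  rw [show accountsA.keys = ["mosfire", "hires", "osiris", "lris", "nires", "deimos", "esi", "nirc2", "nirspec", "kcwi", "kpf", "k1ao", "k2ao", "k1inst", "k2inst", "k1pcs", "k2pcs"] from by decide]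
  simp only [loopA, pvScanG, pvGroups]
  rw [show accountsA.getD "mosfire" [] = ["mosfire1", "mosfire2", "mosfire3", "mosfire4", "mosfire5", "mosfire6", "mosfire7", "mosfire8", "mosfire9", "moseng"] from by decide]
  rw [show telescopeA.getD "mosfire" 0 = 1 from by decide]
  rw [show accountsA.getD "hires" [] = ["hires1", "hires2", "hires3", "hires4", "hires5", "hires6", "hires7", "hires8", "hires9", "hireseng"] from by decide]
  rw [show telescopeA.getD "hires" 0 = 1 from by decide]
  rw [show accountsA.getD "osiris" [] = ["osiris1", "osiris2", "osiris3", "osiris4", "osiris5", "osiris6", "osiris7", "osiris8", "osiris9", "osrseng"] from by decide]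
  rw [show telescopeA.getD "osiris" 0 = 1 from by decide]
  rw [show accountsA.getD "lris" [] = ["lris1", "lris2", "lris3", "lris4", "lris5", "lris6", "lris7", "lris8", "lris9", "lriseng"] from by decide]
  rw [show telescopeA.getD "lris" 0 = 1 from by decide]
  rw [show accountsA.getD "nires" [] = ["nires1", "nires2", "nires3", "nires4", "nires5", "nires6", "nires7", "nires8", "nires9", "nireseng"] from by decide]
  rw [show telescopeA.getD "nires" 0 = 2 from by decide]
  rw [show accountsA.getD "deimos" [] = ["deimos1", "deimos2", "deimos3", "deimos4", "deimos5", "deimos6", "deimos7", "deimos8", "deimos9", "dmoseng"] from by decide]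
  rw [show telescopeA.getD "deimos" 0 = 2 from by decide]
  rw [show accountsA.getD "esi" [] = ["esi1", "esi2", "esi3", "esi4", "esi5", "esi6", "esi7", "esi8", "esi9", "esieng"] from by decide]
  rw [show telescopeA.getD "esi" 0 = 2 from by decide]
  rw [show accountsA.getD "nirc2" [] = ["nirc1", "nirc2", "nirc3", "nirc4", "nirc5", "nirc6", "nirc7", "nirc8", "nirc9", "nirc2eng"] from by decide]
  rw [show telescopeA.getD "nirc2" 0 = 2 from by decide]
  rw [show accountsA.getD "nirspec" [] = ["nspec1", "nspec2", "nspec3", "nspec4", "nspec5", "nspec6", "nspec7", "nspec8", "nspec9", "nspeceng"] from by decide]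
  rw [show telescopeA.getD "nirspec" 0 = 2 from by decide]
  rw [show accountsA.getD "kcwi" [] = ["kcwi1", "kcwi2", "kcwi3", "kcwi4", "kcwi5", "kcwi6", "kcwi7", "kcwi8", "kcwi9", "kcwieng"] from by decide]
  rw [show telescopeA.getD "kcwi" 0 = 2 from by decide]
  rw [show accountsA.getD "kpf" [] = ["kpf1", "kpf2", "kpf3", "kpf4", "kpf5", "kpf6", "kpf7", "kpf8", "kpf9", "kpfeng"] from by decide]
  rw [show telescopeA.getD "kpf" 0 = 1 from by decide]
  rw [show accountsA.getD "k1ao" [] = ["k1obsao"] from by decide]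
  rw [show telescopeA.getD "k1ao" 0 = 1 from by decide]
  rw [show accountsA.getD "k2ao" [] = ["k2obsao"] from by decide]
  rw [show telescopeA.getD "k2ao" 0 = 2 from by decide]
  rw [show accountsA.getD "k1inst" [] = ["k1insttech"] from by decide]
  rw [show telescopeA.getD "k1inst" 0 = 1 from by decide]
  rw [show accountsA.getD "k2inst" [] = ["k2insttech"] from by decide]
  rw [show telescopeA.getD "k2inst" 0 = 2 from by decide]
  rw [show accountsA.getD "k1pcs" [] = ["k1pcs"] from by decide]
  rw [show telescopeA.getD "k1pcs" 0 = 1 from by decide]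
  rw [show accountsA.getD "k2pcs" [] = ["k2pcs"] from by decide]
  rw [show telescopeA.getD "k2pcs" 0 = 2 from by decide]

set_option maxRecDepth 8192 in
theorem pvTableB_eq :
    tableB = PySem.Dict.mk (pvGroups.flatMap (fun g => g.2.map (fun k => (k, g.1)))) := by
  decide

-- ===== VERDICT (by name: the statement is the Claim_ definition above) =====
theorem determine_instrument_spec : Claim_equal_determine_instrument := by
  intro account _
  show determine_instrument account = determine_instrument_alt account
  simp only [determine_instrument, determine_instrument_alt]
  rw [pvA_eq_scan, pvScanG_flatten, ← pvLookF_eq_getD, ← pvTableB_eq]
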